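-- pv_equiv track=rewrite | github.com/appletail/algorithm | Python/5차/ws_5_4.py | sum_of_repeat_number
-- ===== SOURCE A (Python) =====
-- def sum_of_repeat_number(num_list):
--     one = []
--     more = []
--
--     for num in num_list:
--         if num in one or num in more:
--             more.append(num)
--             if num in one:
--                 one.remove(num)
--
--         else:
--             one.append(num)
--     result = sum(one)
--
--     return result
-- ===== SOURCE B (Python) =====
-- def sum_of_repeat_number(num_list):
--     counts = {}
--     for num in num_list:
--         counts[num] = counts.get(num, 0) + 1
--     total = 0
--     for num, c in counts.items():
--         if c == 1:
--             total += num
--     return total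
-- ===== Notes on version B (the rewrite author's own statement) =====
-- stated objective: faster
-- what changed: B counts occurrences once in a dict and sums the keys with count 1, replacing A's incremental two-list membership/removal bookkeeping with its repeated linear scans.
import Mathlib
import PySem

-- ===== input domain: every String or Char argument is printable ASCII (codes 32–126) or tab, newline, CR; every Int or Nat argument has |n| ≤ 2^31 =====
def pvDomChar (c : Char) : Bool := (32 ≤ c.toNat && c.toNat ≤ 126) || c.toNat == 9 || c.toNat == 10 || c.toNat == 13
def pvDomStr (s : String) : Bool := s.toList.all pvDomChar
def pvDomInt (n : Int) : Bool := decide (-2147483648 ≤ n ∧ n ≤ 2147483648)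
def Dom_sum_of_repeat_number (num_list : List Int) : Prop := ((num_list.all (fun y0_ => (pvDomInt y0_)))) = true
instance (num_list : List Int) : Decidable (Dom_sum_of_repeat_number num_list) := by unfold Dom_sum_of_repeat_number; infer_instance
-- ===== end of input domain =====

-- B replaces A's two-list membership/removal bookkeeping by one counting pass over a dict
-- followed by a sum of the keys whose count is 1.

-- ===== PORT A =====
-- the loop body of A: state = (one, more)
def pvStepA (s : List Int × List Int) (num : Int) : List Int × List Int :=
  if s.1.contains num || s.2.contains num then
    -- more.append(num); if num in one: one.remove(num)  (remove? is guarded, so getD is unreachable)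
    (if s.1.contains num then (PySem.List.remove? s.1 num).getD s.1 else s.1, s.2 ++ [num])
  else
    (s.1 ++ [num], s.2)

def sum_of_repeat_number (num_list : List Int) : Int :=
  (num_list.foldl pvStepA ([], [])).1.sum

-- ===== PORT B =====
def sum_of_repeat_number_alt (num_list : List Int) : Int :=
  let counts : PySem.Dict Int Int :=
    num_list.foldl (fun d num => d.insert num (d.getD num 0 + 1)) PySem.Dict.empty
  counts.items.foldl (fun total p => if p.2 == 1 then total + p.1 else total) 0

-- ===== PRECONDITION & SPEC =====
def Spec_sum_of_repeat_number (num_list : List Int) (out : Int) : Prop := out = sum_of_repeat_number_alt num_list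
instance (num_list : List Int) (out : Int) : Decidable (Spec_sum_of_repeat_number num_list out) := by unfold Spec_sum_of_repeat_number; infer_instance

-- ===== CLAIM (what is proved, stated in full; the proofs are below) =====
def Claim_equal_sum_of_repeat_number : Prop := ∀ (num_list : List Int), Dom_sum_of_repeat_number num_list → Spec_sum_of_repeat_number num_list (sum_of_repeat_number num_list)

-- ===== LEMMAS AND PROOFS =====

-- the elements of l that occur exactly once in l, in order
def pvOnce (l : List Int) : List Int := l.filter (fun x => l.count x == 1)

lemma pvOnce_nodup (l : List Int) : (pvOnce l).Nodup := by
  rw [List.nodup_iff_count_le_one]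
  intro a
  by_cases h : (l.count a == 1) = true
  · have hle := (List.filter_sublist (l := l) (p := fun x => l.count x == 1)).count_le a
    simp only [beq_iff_eq] at h
    rw [pvOnce]; omega
  · have hnm : a ∉ pvOnce l := fun hm => h (List.mem_filter.mp hm).2
    simp [List.count_eq_zero_of_not_mem hnm]

-- A's loop invariant, by reverse induction on the processed prefix
lemma pvInvA (l : List Int) :
    (l.foldl pvStepA ([], [])).1 = pvOnce l ∧
    (∀ x : Int, x ∈ (l.foldl pvStepA ([], [])).2 ↔ 2 ≤ l.count x) := by
  induction l using List.reverseRecOn with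
  | nil => simp [pvOnce]
  | append_singleton l y ih =>
    obtain ⟨h1, h2⟩ := ih
    have hcnt : ∀ x : Int, (l ++ [y]).count x = l.count x + if x = y then 1 else 0 := by
      intro x
      by_cases hxy : x = y
      · subst hxy; simp [List.count_append]
      · have h0 : List.count x [y] = 0 := List.count_eq_zero.mpr (by simp [hxy])
        simp [List.count_append, h0, hxy]
    rw [List.foldl_append, List.foldl_cons, List.foldl_nil, pvStepA]
    split_ifs with hmem hone <;> dsimp only
    · -- y was in 'one' (its count so far is 1): it moves to 'more'
      have hyo : y ∈ pvOnce l := by rw [← h1]; simpa using hone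
      have hy : y ∈ l := (List.mem_filter.mp hyo).1
      have hc : l.count y = 1 := by simpa using (List.mem_filter.mp hyo).2
      constructor
      · rw [h1, PySem.List.remove?_eq_some_erase _ _ hyo, Option.getD_some,
            List.Nodup.erase_eq_filter (pvOnce_nodup l) y]
        rw [pvOnce, pvOnce, List.filter_filter, List.filter_append]
        have h0 : [y].filter (fun x => (l ++ [y]).count x == 1) = [] := by
          simp [hc]
        rw [h0, List.append_nil]
        apply List.filter_congr
        intro x hx
        by_cases hxy : x = y
        · subst hxy; simp [hcnt x, hc]
        · simp [hcnt x, hxy]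
      · intro x
        simp only [List.mem_append, List.mem_singleton, h2, hcnt x]
        by_cases hxy : x = y <;> (simp [hxy, hc]; try omega)
    · -- y was already in 'more' (count so far ≥ 2): 'one' is unchanged
      have hno : y ∉ (l.foldl pvStepA ([], [])).1 := by simpa using hone
      have hym : y ∈ (l.foldl pvStepA ([], [])).2 := by
        have hor : y ∈ (l.foldl pvStepA ([], [])).1 ∨ y ∈ (l.foldl pvStepA ([], [])).2 := by
          simpa using hmem
        tauto
      have hc2 : 2 ≤ l.count y := (h2 y).mp hym
      have hy : y ∈ l := List.count_pos_iff.mp (by omega)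
      constructor
      · rw [h1, pvOnce, pvOnce, List.filter_append]
        have h0 : [y].filter (fun x => (l ++ [y]).count x == 1) = [] := by
          simp; omega
        rw [h0, List.append_nil]
        apply List.filter_congr
        intro x hx
        by_cases hxy : x = y
        · subst hxy; simp [hcnt x]; omega
        · simp [hcnt x, hxy]
      · intro x
        simp only [List.mem_append, List.mem_singleton, h2, hcnt x]
        by_cases hxy : x = y <;> (simp [hxy]; try omega)
    · -- y is new: it is appended to 'one'
      have hno : y ∉ (l.foldl pvStepA ([], [])).1 ∧ y ∉ (l.foldl pvStepA ([], [])).2 := by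
        simpa using hmem
      have hy : y ∉ l := by
        intro hy
        by_cases hc : l.count y = 1
        · exact hno.1 (h1 ▸ List.mem_filter.mpr ⟨hy, by simp [hc]⟩)
        · have hc2 : 2 ≤ l.count y := by have := List.count_pos_iff.mpr hy; omega
          exact hno.2 ((h2 y).mpr hc2)
      have hcy : l.count y = 0 := List.count_eq_zero.mpr hy
      constructor
      · rw [h1, pvOnce, pvOnce, List.filter_append]
        have h0 : [y].filter (fun x => (l ++ [y]).count x == 1) = [y] := by
          simp [hcy]
        rw [h0]
        congr 1
        apply List.filter_congr
        intro x hx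
        have hxy : x ≠ y := fun h => hy (h ▸ hx)
        simp [hcnt x, hxy]
      · intro x
        simp only [h2, hcnt x]
        by_cases hxy : x = y <;> (simp [hxy, hcy]; try omega)

-- summing (if count = 1 then k else 0) over the distinct elements = sum of pvOnce, up to permutation
lemma pvSumDedup (l : List Int) :
    ((PySem.List.dedup l).map (fun k => if l.count k == 1 then k else (0:Int))).sum = (pvOnce l).sum := by
  have hperm : (pvOnce l).Perm ((PySem.List.dedup l).filter (fun x => l.count x == 1)) := by
    rw [List.perm_ext_iff_of_nodup (pvOnce_nodup l) ((PySem.List.nodup_dedup l).filter _)]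
    intro a
    simp [pvOnce, List.mem_filter]
  rw [hperm.sum_eq]
  generalize PySem.List.dedup l = d
  induction d with
  | nil => simp
  | cons x d ih =>
    rw [List.map_cons, List.sum_cons, List.filter_cons]
    by_cases hx : (l.count x == 1) = true
    · rw [if_pos hx, if_pos hx, List.sum_cons, ih]
    · rw [if_neg hx, if_neg hx, ih, zero_add]

lemma pvAltEq (l : List Int) : sum_of_repeat_number_alt l = (pvOnce l).sum := by
  rw [sum_of_repeat_number_alt]
  rw [PySem.Dict.foldl_insert_getD_add_one_eq_counter, PySem.Dict.items_counter]
  rw [← PySem.List.dedup_eq_ofList, ← pvSumDedup l, List.foldl_map]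
  have : ∀ (a : Int) (d : List Int),
      d.foldl (fun total k => if ((l.count k : Int) == 1) = true then total + k else total) a
      = a + (d.map (fun k => if l.count k == 1 then k else (0:Int))).sum := by
    intro a d
    induction d generalizing a with
    | nil => simp
    | cons x d ih =>
      rw [List.foldl_cons, List.map_cons, List.sum_cons, ih]
      by_cases hx : l.count x = 1 <;> (simp [hx]; try ring)
  rw [this]; ring

-- ===== VERDICT (by name: the statement is the Claim_ definition above) =====
theorem sum_of_repeat_number_spec : Claim_equal_sum_of_repeat_number := by
  intro l _
  show sum_of_repeat_number l = sum_of_repeat_number_alt l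
  rw [sum_of_repeat_number, (pvInvA l).1, pvAltEq]
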